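/- GENERATED by farm/worked/mk_tree_copies.py from farm/worked/inverse_mdct.COMPOSITION/Proof.lean (a worked proof of the farm's unit `inverse_mdct.COMPOSITION`,
   accepted by the verdict) — do not edit. -/
import Vorbis.Spec.Units.inverse_mdct_COMPOSITION

/- THE COMPOSITION OF inverse_mdct (S8's proof, in the farm's format): the segment statements give the function's contract, by
   `ReachVia.trans` and an induction on the measure the loop head's assertion carries. No machine code is walked. -/
open X86 X86.User Asan Vorbis Vorbis.Spec

namespace Vorbis.Spec.Worked.inverse_mdct_COMPOSITION
open Vorbis.Spec.inverse_mdct_COMPOSITION (Statement)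

/-- From the head of the step-8 loop after `t` iterations the function returns: induction on the measure `n16 − t`. -/
theorem inverse_mdct_from_s8_head_w {Lay : Layout} {μ : Microarch} {u₀ : State}
    (hseg10 : inverse_mdct.Seg10 Lay μ u₀) (hseg11 : inverse_mdct.Seg11 Lay μ u₀) (hseg12 : inverse_mdct.Seg12 Lay μ u₀)
    (others : List Obj) (frames : List (Nat × FrameLayout)) (len : Nat) (A : Arena) (stored room : Int)
    (ysz : Nat → Nat) (k c : Nat) (ue : State)
    (ret : Word) :
    ∀ (m t : Nat) (v : State), inverse_mdct.n ue / 16 - t = m →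
      inverse_mdct.AtS8Head u₀ others frames len A stored room ysz k c ue ret t v →
      ReachVia Lay μ WayInv v (Returned (conv u₀) (inverse_mdct.spec others frames len A stored room ysz k c) ue ret) := by
  intro m
  induction m with
  | zero =>
    intro t v hm hv
    apply (hseg12 others frames len A stored room ysz k c ue ret t v hv).trans
    intro w hw
    rcases hw with hbody | hret
    · have hlt := hbody.2.2
      omega
    · exact ReachVia.done hret
  | succ m ih =>
    intro t v hm hv
    apply (hseg12 others frames len A stored room ysz k c ue ret t v hv).trans
    intro w hw
    rcases hw with hbody | hret
    · have hlt := hbody.2.2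
      apply (hseg10 others frames len A stored room ysz k c ue ret t w hbody).trans
      intro x hx
      apply (hseg11 others frames len A stored room ysz k c ue ret t x hx).trans
      intro y hy
      exact ih (t + 1) y (by omega) hy
    · exact ReachVia.done hret

end Vorbis.Spec.Worked.inverse_mdct_COMPOSITION

theorem Vorbis.Spec.Worked.inverse_mdct_COMPOSITION_ok : Vorbis.Spec.inverse_mdct_COMPOSITION.Statement := by
  intro Lay hLay μ hμ u₀ hseg1 hseg2 hseg3 hseg4 hseg5 hseg6 hseg7 hseg8 hseg9 hseg10 hseg11 hseg12 others frames len A stored room ysz k c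
    u ret he hpre
  apply (hseg1 others frames len A stored room ysz k c u ret he hpre).trans
  intro v2 h2
  apply (hseg2 others frames len A stored room ysz k c u ret v2 h2).trans
  intro v3 h3
  apply (hseg3 others frames len A stored room ysz k c u ret v3 h3).trans
  intro v4 h4
  apply (hseg4 others frames len A stored room ysz k c u ret v4 h4).trans
  intro v5 h5
  apply (hseg5 others frames len A stored room ysz k c u ret v5 h5).trans
  intro v6 h6
  apply (hseg6 others frames len A stored room ysz k c u ret v6 h6).trans
  intro v7 h7
  apply (hseg7 others frames len A stored room ysz k c u ret v7 h7).trans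
  intro v8 h8
  apply (hseg8 others frames len A stored room ysz k c u ret v8 h8).trans
  intro v9 h9
  apply (hseg9 others frames len A stored room ysz k c u ret v9 h9).trans
  intro v10 h10
  exact Vorbis.Spec.Worked.inverse_mdct_COMPOSITION.inverse_mdct_from_s8_head_w hseg10 hseg11 hseg12 others frames len A stored room ysz k c u ret _ 0 v10 rfl h10
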